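-- pv_equiv track=rewrite | github.com/euphonious19/GU-Technical-Training-2026 | Lokesh-kumar-Sharma/Leetcode/Prefix & Surfix/848_Shifting_Letters.py | shiftingLetters
-- ===== SOURCE A (Python) =====
-- from typing import List
--
-- def shiftingLetters(s: str, shifts: List[int]) -> str:
--     n = len(shifts)
--     suffix_sum = [0] * n
--     suffix_sum[-1] = shifts[-1]
--     for i in range(n - 2, -1, -1):
--         suffix_sum[i] = (suffix_sum[i + 1] + shifts[i]) % 26
--
--     res = []
--     for i in range(len(s)):
--         char = chr((ord(s[i]) - ord('a') + suffix_sum[i]) % 26 + ord('a'))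
--         res.append(char)
--
--     return "".join(res)
-- ===== SOURCE B (Python) =====
-- def shiftingLetters(s, shifts):
--     total = 0
--     out = []
--     for i in range(len(shifts) - 1, -1, -1):
--         total = (total + shifts[i]) % 26
--         if i < len(s):
--             out.append(chr((ord(s[i]) - 97 + total) % 26 + 97))
--     out.reverse()
--     return "".join(out)
-- ===== Notes on version B (the rewrite author's own statement) =====
-- stated objective: simpler
-- what changed: B eliminates A's intermediate suffix-sum array entirely: a single backward pass keeps one running total (mod 26) and emits each shifted character on the fly, then reverses the collected characters.
import Mathlib
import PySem

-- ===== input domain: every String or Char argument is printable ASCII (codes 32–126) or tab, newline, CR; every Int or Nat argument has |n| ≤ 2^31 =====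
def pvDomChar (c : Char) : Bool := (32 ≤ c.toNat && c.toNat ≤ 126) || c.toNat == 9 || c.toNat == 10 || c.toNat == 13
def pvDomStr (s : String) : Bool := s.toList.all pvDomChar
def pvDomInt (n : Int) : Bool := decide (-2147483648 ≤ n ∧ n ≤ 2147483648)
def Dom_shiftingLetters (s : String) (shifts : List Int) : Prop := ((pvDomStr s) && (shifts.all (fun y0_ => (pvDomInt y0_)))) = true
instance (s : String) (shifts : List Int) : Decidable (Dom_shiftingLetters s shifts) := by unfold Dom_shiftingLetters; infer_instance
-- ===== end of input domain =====

-- B drops A's suffix-sum array: one backward pass keeps a running total (mod 26) and emits chars directly (simpler decomposition; return-value equivalence on nonempty shifts with len(s) <= len(shifts)).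


-- ===== PORT A =====
def shiftingLetters (s : String) (shifts : List Int) : String :=
  let n := shifts.length
  -- suffix_sum = [0]*n; suffix_sum[-1] = shifts[-1]  (empty shifts raises IndexError: excluded by Pre_)
  let suffix0 := (List.replicate n (0 : Int)).set (n - 1) (shifts.getD (n - 1) 0)
  -- for i in range(n-2, -1, -1): suffix_sum[i] = (suffix_sum[i+1] + shifts[i]) % 26
  let suffix := (PySem.List.pyRange ((n : Int) - 2) (-1) (-1)).foldl
      (fun arr i =>
        arr.set i.toNat (PySem.Int.mod (arr.getD (i.toNat + 1) 0 + shifts.getD i.toNat 0) 26))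
      suffix0
  -- for i in range(len(s)): res.append(chr((ord(s[i]) - 97 + suffix_sum[i]) % 26 + 97))
  -- (len(s) > len(shifts) raises IndexError on suffix_sum[i]: excluded by Pre_)
  let res := (PySem.List.pyRange 0 (s.toList.length : Int) 1).foldl
      (fun res i =>
        res ++ [Char.ofNat ((PySem.Int.mod (((s.toList.getD i.toNat 'a').toNat : Int) - 97
                              + suffix.getD i.toNat 0) 26 + 97).toNat)])
      []
  String.mk res

-- ===== PORT B =====
def shiftingLetters_alt (s : String) (shifts : List Int) : String :=
  let cs := s.toList
  -- total = 0; out = []; for i in range(len(shifts)-1, -1, -1): update total; maybe append char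
  let st := (PySem.List.pyRange ((shifts.length : Int) - 1) (-1) (-1)).foldl
      (fun (st : Int × List Char) i =>
        let total := PySem.Int.mod (st.1 + shifts.getD i.toNat 0) 26
        (total,
          if i.toNat < cs.length then
            st.2 ++ [Char.ofNat ((PySem.Int.mod (((cs.getD i.toNat 'a').toNat : Int) - 97
                                   + total) 26 + 97).toNat)]
          else st.2))
      ((0 : Int), ([] : List Char))
  -- out.reverse(); return "".join(out)
  String.mk st.2.reverse

-- ===== PRECONDITION & SPEC =====
-- Pre_ excludes exactly the inputs where A raises IndexError: empty shifts (shifts[-1]),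
-- and len(s) > len(shifts) (suffix_sum[i] out of range).
def Pre_shiftingLetters (s : String) (shifts : List Int) : Prop :=
  shifts ≠ [] ∧ s.toList.length ≤ shifts.length
instance (s : String) (shifts : List Int) : Decidable (Pre_shiftingLetters s shifts) := by
  unfold Pre_shiftingLetters; infer_instance

def pvWitness_shiftingLetters : String × List Int := ("ab", [1, 2])

def Spec_shiftingLetters (s : String) (shifts : List Int) (out : String) : Prop := out = shiftingLetters_alt s shifts
instance (s : String) (shifts : List Int) (out : String) : Decidable (Spec_shiftingLetters s shifts out) := by unfold Spec_shiftingLetters; infer_instance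

-- ===== CLAIM (what is proved, stated in full; the proofs are below) =====
def Claim_equal_shiftingLetters : Prop := ∀ (s : String) (shifts : List Int), Dom_shiftingLetters s shifts → Pre_shiftingLetters s shifts → Spec_shiftingLetters s shifts (shiftingLetters s shifts)


-- ===== LEMMAS AND PROOFS =====

/-- The shifted character, as both programs compute it. -/
def pvCh (c : Char) (x : Int) : Char :=
  Char.ofNat ((PySem.Int.mod (((c.toNat : Int)) - 97 + x) 26 + 97).toNat)

theorem pvMod26 (x : Int) : PySem.Int.mod x 26 = x % 26 :=
  PySem.Int.mod_eq_emod_of_pos (by norm_num)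

theorem pvCh_congr (c : Char) {x y : Int} (h : x % 26 = y % 26) : pvCh c x = pvCh c y := by
  unfold pvCh
  rw [pvMod26, pvMod26, Int.add_emod ((c.toNat : Int) - 97) x, h,
      ← Int.add_emod ((c.toNat : Int) - 97) y]

theorem pvDropSum (shifts : List Int) (k : Nat) (hk : k < shifts.length) :
    (shifts.drop k).sum = shifts[k] + (shifts.drop (k + 1)).sum := by
  rw [List.drop_eq_getElem_cons hk, List.sum_cons]

theorem pvSuffixFold (shifts : List Int) :
    ∀ (m : Nat) (arr : List Int), m < shifts.length → arr.length = shifts.length →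
    (∀ k, m ≤ k → k < shifts.length →
      (arr.getD k 0) % 26 = ((shifts.drop k).sum) % 26) →
    ∀ k, k < shifts.length →
      (((PySem.List.pyRange ((m : Int) - 1) (-1) (-1)).foldl
        (fun arr i =>
          arr.set i.toNat (PySem.Int.mod (arr.getD (i.toNat + 1) 0 + shifts.getD i.toNat 0) 26))
        arr).getD k 0) % 26 = ((shifts.drop k).sum) % 26 := by
  intro m
  induction m with
  | zero =>
    intro arr hm hlen hinv k hk
    rw [show ((0 : Nat) : Int) - 1 = -1 by norm_num,
        PySem.List.pyRange_neg_one_eq_nil (le_refl (-1))]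
    exact hinv k (Nat.zero_le k) hk
  | succ m ih =>
    intro arr hm hlen hinv k hk
    rw [show ((m + 1 : Nat) : Int) - 1 = (m : Int) by push_cast; ring,
        PySem.List.pyRange_neg_one_cons (show (-1 : Int) < (m : Int) by omega),
        List.foldl_cons]
    simp only [Int.toNat_natCast]
    have hmn : m < shifts.length := Nat.lt_of_succ_lt hm
    have hm1 : m + 1 < shifts.length := hm
    set v : Int := PySem.Int.mod (arr.getD (m + 1) 0 + shifts.getD m 0) 26 with hv
    have hlen2 : (arr.set m v).length = shifts.length := by simpa using hlen
    have hinv2 : ∀ j, m ≤ j → j < shifts.length →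
        ((arr.set m v).getD j 0) % 26 = ((shifts.drop j).sum) % 26 := by
      intro j hmj hj
      by_cases hjm : j = m
      · subst hjm
        have hja : j < arr.length := by omega
        have hset : (arr.set j v).getD j 0 = v := by
          simp [List.getD, List.getElem?_set_self hja]
        rw [hset, hv, pvMod26, Int.emod_emod_of_dvd _ (dvd_refl 26),
            Int.add_emod, hinv (j + 1) (by omega) hm1,
            List.getD_eq_getElem shifts 0 (by omega), ← Int.add_emod,
            pvDropSum shifts j (by omega), Int.add_comm]
      · have hset : (arr.set m v).getD j 0 = arr.getD j 0 := by
          simp [List.getD, List.getElem?_set_ne (fun h => hjm h.symm)]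
        rw [hset]
        exact hinv j (by omega) hj
    exact ih (arr.set m v) hmn hlen2 hinv2 k hk

theorem pvFoldAppend {α β : Type} (g : α → β) :
    ∀ (l : List α) (acc : List β), l.foldl (fun r i => r ++ [g i]) acc = acc ++ l.map g := by
  intro l
  induction l with
  | nil => intro acc; simp
  | cons x xs ih => intro acc; simp [ih]

theorem pvAltFold (s : String) (shifts : List Int) :
    ∀ (m : Nat), m ≤ shifts.length → ∀ (o : List Char),
    (PySem.List.pyRange ((m : Int) - 1) (-1) (-1)).foldl
      (fun (st : Int × List Char) i =>
        let total := PySem.Int.mod (st.1 + shifts.getD i.toNat 0) 26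
        (total,
          if i.toNat < s.toList.length then
            st.2 ++ [Char.ofNat ((PySem.Int.mod (((s.toList.getD i.toNat 'a').toNat : Int) - 97
                                   + total) 26 + 97).toNat)]
          else st.2))
      (PySem.Int.mod ((shifts.drop m).sum) 26, o)
    = (PySem.Int.mod shifts.sum 26,
       o ++ ((List.range (min m s.toList.length)).map
              (fun i => pvCh (s.toList.getD i 'a') ((shifts.drop i).sum))).reverse) := by
  intro m
  induction m with
  | zero =>
    intro _ o
    rw [show ((0 : Nat) : Int) - 1 = -1 by norm_num,
        PySem.List.pyRange_neg_one_eq_nil (le_refl (-1))]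
    simp
  | succ m ih =>
    intro hm o
    rw [show ((m + 1 : Nat) : Int) - 1 = (m : Int) by push_cast; ring,
        PySem.List.pyRange_neg_one_cons (show (-1 : Int) < (m : Int) by omega),
        List.foldl_cons]
    have hmn : m < shifts.length := hm
    have htot : PySem.Int.mod (PySem.Int.mod ((shifts.drop (m + 1)).sum) 26 + shifts.getD m 0) 26
        = PySem.Int.mod ((shifts.drop m).sum) 26 := by
      rw [pvMod26, pvMod26, pvMod26, Int.add_emod, Int.emod_emod_of_dvd _ (dvd_refl 26),
          List.getD_eq_getElem shifts 0 hmn, ← Int.add_emod,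
          pvDropSum shifts m hmn, Int.add_comm]
    have hch : Char.ofNat ((PySem.Int.mod (((s.toList.getD m 'a').toNat : Int) - 97
                 + PySem.Int.mod ((shifts.drop m).sum) 26) 26 + 97).toNat)
        = pvCh (s.toList.getD m 'a') ((shifts.drop m).sum) := by
      apply pvCh_congr
      rw [pvMod26, Int.emod_emod_of_dvd _ (dvd_refl 26)]
    simp only [Int.toNat_natCast, htot, hch]
    rw [ih (Nat.le_of_succ_le hm)]
    by_cases hms : m < s.toList.length
    · have h1 : min (m + 1) s.toList.length = min m s.toList.length + 1 := by omega
      have h2 : min m s.toList.length = m := by omega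
      rw [if_pos hms, h1, h2, List.range_succ, List.map_append, List.map_cons,
          List.map_nil, List.reverse_append]
      simp [List.append_assoc]
    · have h1 : min (m + 1) s.toList.length = min m s.toList.length := by omega
      rw [if_neg hms, h1]

theorem pvA_eq (s : String) (shifts : List Int) (hne : shifts ≠ [])
    (hle : s.toList.length ≤ shifts.length) :
    shiftingLetters s shifts
      = String.mk ((List.range s.toList.length).map
          (fun i => pvCh (s.toList.getD i 'a') ((shifts.drop i).sum))) := by
  have hn : 1 ≤ shifts.length := List.length_pos_iff.mpr hne
  have hsuf : ∀ k, k < shifts.length →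
      (((PySem.List.pyRange ((shifts.length : Int) - 2) (-1) (-1)).foldl
        (fun arr i =>
          arr.set i.toNat (PySem.Int.mod (arr.getD (i.toNat + 1) 0 + shifts.getD i.toNat 0) 26))
        ((List.replicate shifts.length (0 : Int)).set (shifts.length - 1)
          (shifts.getD (shifts.length - 1) 0))).getD k 0) % 26
      = ((shifts.drop k).sum) % 26 := by
    have hrange : ((shifts.length : Int) - 2) = ((shifts.length - 1 : Nat) : Int) - 1 := by
      omega
    rw [hrange]
    apply pvSuffixFold shifts (shifts.length - 1) _ (by omega) (by simp)
    intro k hk1 hk2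
    have hk : k = shifts.length - 1 := by omega
    subst hk
    have hlt : shifts.length - 1 < (List.replicate shifts.length (0 : Int)).length := by
      simp; omega
    have hget : ((List.replicate shifts.length (0 : Int)).set (shifts.length - 1)
        (shifts.getD (shifts.length - 1) 0)).getD (shifts.length - 1) 0
        = shifts.getD (shifts.length - 1) 0 := by
      simp [List.getD, List.getElem?_set_self hlt]
    rw [hget, List.getD_eq_getElem shifts 0 (by omega),
        pvDropSum shifts (shifts.length - 1) (by omega),
        show shifts.length - 1 + 1 = shifts.length by omega, List.drop_length]
    simp
  show (let n := shifts.length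
    let suffix0 := (List.replicate n (0 : Int)).set (n - 1) (shifts.getD (n - 1) 0)
    let suffix := (PySem.List.pyRange ((n : Int) - 2) (-1) (-1)).foldl
        (fun arr i =>
          arr.set i.toNat (PySem.Int.mod (arr.getD (i.toNat + 1) 0 + shifts.getD i.toNat 0) 26))
        suffix0
    let res := (PySem.List.pyRange 0 (s.toList.length : Int) 1).foldl
        (fun res i =>
          res ++ [Char.ofNat ((PySem.Int.mod (((s.toList.getD i.toNat 'a').toNat : Int) - 97
                                + suffix.getD i.toNat 0) 26 + 97).toNat)])
        []
    String.mk res) = _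
  simp only [PySem.List.pyRange_zero_natCast, List.foldl_map, pvFoldAppend, List.nil_append]
  congr 1
  apply List.map_congr_left
  intro i hi
  have his : i < s.toList.length := List.mem_range.mp hi
  have hin : i < shifts.length := lt_of_lt_of_le his hle
  simp only [Int.toNat_natCast]
  exact pvCh_congr _ (by rw [← pvMod26, ← pvMod26, pvMod26, pvMod26]; exact hsuf i hin)

theorem pvB_eq (s : String) (shifts : List Int) (hle : s.toList.length ≤ shifts.length) :
    shiftingLetters_alt s shifts
      = String.mk ((List.range s.toList.length).map
          (fun i => pvCh (s.toList.getD i 'a') ((shifts.drop i).sum))) := by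
  have h0 : ((0 : Int)) = PySem.Int.mod ((shifts.drop shifts.length).sum) 26 := by
    rw [List.drop_length]; simp
  have hfold := pvAltFold s shifts shifts.length (le_refl _) []
  have hmin : min shifts.length s.toList.length = s.toList.length := by omega
  rw [hmin] at hfold
  rw [← h0] at hfold
  show String.mk (((PySem.List.pyRange ((shifts.length : Int) - 1) (-1) (-1)).foldl
      (fun (st : Int × List Char) i =>
        let total := PySem.Int.mod (st.1 + shifts.getD i.toNat 0) 26
        (total,
          if i.toNat < s.toList.length then
            st.2 ++ [Char.ofNat ((PySem.Int.mod (((s.toList.getD i.toNat 'a').toNat : Int) - 97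
                                   + total) 26 + 97).toNat)]
          else st.2))
      ((0 : Int), ([] : List Char))).2.reverse) = _
  rw [hfold]
  simp

-- ===== VERDICT (by name: the statement is the Claim_ definition above) =====
theorem shiftingLetters_spec : Claim_equal_shiftingLetters := by
  intro s shifts _ hpre
  unfold Spec_shiftingLetters
  rw [pvA_eq s shifts hpre.1 hpre.2, pvB_eq s shifts hpre.2]
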